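-- pv_equiv track=rewrite | github.com/Ineedm0re-11090675/Mac_Cleaner | python/application_manager.py | _looks_like_bundle_identifier
-- ===== SOURCE A (Python) =====
-- def _looks_like_bundle_identifier(identifier: str) -> bool:
--     parts = [part for part in identifier.split(".") if part]
--     if len(parts) < 2:
--         return False
--     for part in parts:
--         if not all(ch.isalnum() or ch in {"-", "_"} for ch in part):
--             return False
--     return True
-- ===== SOURCE B (Python) =====
-- def _looks_like_bundle_identifier(identifier: str) -> bool:
--     segment_len = 0
--     count = 0
--     for ch in identifier:
--         if ch == ".":
--             if segment_len > 0:
--                 count += 1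
--             segment_len = 0
--         elif ch.isalnum() or ch in {"-", "_"}:
--             segment_len += 1
--         else:
--             return False
--     if segment_len > 0:
--         count += 1
--     return count >= 2
-- ===== Notes on version B (the rewrite author's own statement) =====
-- stated objective: alternative
-- what changed: Replaces the split-then-filter-then-per-part-validate passes (which build intermediate part lists) by a single left-to-right character scan that tracks the current segment length and the number of completed non-empty segments, returning False immediately on an invalid character.
import Mathlib
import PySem

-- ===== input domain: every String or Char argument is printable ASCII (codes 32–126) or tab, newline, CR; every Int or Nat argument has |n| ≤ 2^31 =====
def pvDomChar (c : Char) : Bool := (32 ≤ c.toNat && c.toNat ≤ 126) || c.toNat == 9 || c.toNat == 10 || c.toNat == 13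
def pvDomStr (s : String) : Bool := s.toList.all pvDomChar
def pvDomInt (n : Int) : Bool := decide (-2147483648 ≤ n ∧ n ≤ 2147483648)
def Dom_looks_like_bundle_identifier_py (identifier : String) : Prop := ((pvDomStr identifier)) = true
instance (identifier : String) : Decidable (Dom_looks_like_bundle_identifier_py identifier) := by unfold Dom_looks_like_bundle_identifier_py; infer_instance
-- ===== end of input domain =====

-- B: a single character scan with segment-length/segment-count state instead of A's split+filter+per-part validation passes (alternative decomposition, same O(n)).

-- ===== PORT A =====
def looks_like_bundle_identifier_py (identifier : String) : Bool :=
  match PySem.Chars.split? identifier.toList ['.'] with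
  | none => false   -- unreachable: the separator "." is non-empty
  | some ps =>
    let parts := ps.filter (fun p => !p.isEmpty)
    if parts.length < 2 then false
    else parts.all (fun part => part.all (fun ch => PySem.Chars.isalnum ch || ch == '-' || ch == '_'))

-- ===== PORT B =====
def bundleScan (cs : List Char) (segLen : Nat) (count : Nat) : Bool :=
  match cs with
  | [] => decide (2 ≤ (if 0 < segLen then count + 1 else count))
  | c :: rest =>
    if c == '.' then bundleScan rest 0 (if 0 < segLen then count + 1 else count)
    else if PySem.Chars.isalnum c || c == '-' || c == '_' then bundleScan rest (segLen + 1) count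
    else false

def looks_like_bundle_identifier_py_alt (identifier : String) : Bool :=
  bundleScan identifier.toList 0 0

-- ===== PRECONDITION & SPEC =====
def Spec_looks_like_bundle_identifier_py (identifier : String) (out : Bool) : Prop := out = looks_like_bundle_identifier_py_alt identifier
instance (identifier : String) (out : Bool) : Decidable (Spec_looks_like_bundle_identifier_py identifier out) := by unfold Spec_looks_like_bundle_identifier_py; infer_instance

-- ===== CLAIM (what is proved, stated in full; the proofs are below) =====
def Claim_equal_looks_like_bundle_identifier_py : Prop := ∀ (identifier : String), Dom_looks_like_bundle_identifier_py identifier → Spec_looks_like_bundle_identifier_py identifier (looks_like_bundle_identifier_py identifier)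

-- ===== LEMMAS AND PROOFS =====
def pvValid (c : Char) : Bool := PySem.Chars.isalnum c || c == '-' || c == '_'

/-- Structural model of Python's `split('.')`: `cur` is the reversed current segment. -/
def pvSplit : List Char → List Char → List (List Char)
  | cur, [] => [cur.reverse]
  | cur, c :: rest => if c = '.' then cur.reverse :: pvSplit [] rest else pvSplit (c :: cur) rest

theorem pvGo_eq : ∀ (fuel : Nat) (l cur : List Char) (acc : List (List Char)), l.length ≤ fuel →
    PySem.Chars.splitOn.go ['.'] fuel l cur acc = acc.reverse ++ pvSplit cur l := by
  intro fuel
  induction fuel with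
  | zero =>
    intro l cur acc h
    have : l = [] := List.eq_nil_of_length_eq_zero (Nat.le_zero.mp h)
    subst this
    rw [PySem.Chars.splitOn.go.eq_def]
    simp [pvSplit]
  | succ f ih =>
    intro l cur acc h
    cases l with
    | nil =>
      rw [PySem.Chars.splitOn.go.eq_def]
      simp [pvSplit]
    | cons c rest =>
      rw [PySem.Chars.splitOn.go.eq_def]
      by_cases hc : c = '.'
      · subst hc
        have hpre : List.isPrefixOf ['.'] ('.' :: rest) = true := by
          simp [List.isPrefixOf]
        simp only [hpre, if_pos]
        rw [ih _ _ _ (by simpa using Nat.le_of_succ_le_succ h)]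
        simp [pvSplit]
      · have hpre : List.isPrefixOf ['.'] (c :: rest) = false := by
          simp [List.isPrefixOf, Ne.symm hc]
        simp only [hpre, Bool.false_eq_true, if_false]
        rw [ih _ _ _ (Nat.le_of_succ_le_succ h)]
        simp [pvSplit, hc]

theorem pvSplit_exists_superset : ∀ (l cur : List Char), ∃ p ∈ pvSplit cur l, ∀ x ∈ cur, x ∈ p := by
  intro l
  induction l with
  | nil =>
    intro cur
    exact ⟨cur.reverse, by simp [pvSplit], by intro x hx; simpa using hx⟩
  | cons c rest ih =>
    intro cur
    by_cases hc : c = '.'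
    · exact ⟨cur.reverse, by simp [pvSplit, hc], by intro x hx; simpa using hx⟩
    · obtain ⟨p, hp, hsub⟩ := ih (c :: cur)
      refine ⟨p, by simp [pvSplit, hc, hp], ?_⟩
      intro x hx
      exact hsub x (List.mem_cons_of_mem _ hx)

theorem bundleScan_eq : ∀ (l cur : List Char) (count : Nat),
    (∀ c ∈ cur, pvValid c = true) →
    bundleScan l cur.length count =
      (decide (2 ≤ count + ((pvSplit cur l).filter (fun p => !p.isEmpty)).length)
        && ((pvSplit cur l).filter (fun p => !p.isEmpty)).all (fun p => p.all pvValid)) := by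
  intro l
  induction l with
  | nil =>
    intro cur count hcur
    cases cur with
    | nil => simp [bundleScan, pvSplit]
    | cons a as =>
      have hall : (a :: as).reverse.all pvValid = true := by
        rw [List.all_eq_true]; intro x hx; exact hcur x (List.mem_reverse.mp hx)
      have hl : bundleScan [] (a :: as).length count = decide (2 ≤ count + 1) := by
        simp [bundleScan]
      have hf : (pvSplit (a :: as) []).filter (fun p => !p.isEmpty) = [(a :: as).reverse] := by
        simp [pvSplit]
      rw [hl, hf]
      have h2 : ([(a :: as).reverse] : List (List Char)).all (fun p => p.all pvValid) = true := by
        rw [List.all_cons, List.all_nil, Bool.and_true]; exact hall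
      rw [h2, Bool.and_true]
      rfl
  | cons c rest ih =>
    intro cur count hcur
    by_cases hc : c = '.'
    · subst hc
      have hstep : bundleScan ('.' :: rest) cur.length count
          = bundleScan rest ([] : List Char).length (if 0 < cur.length then count + 1 else count) := by
        simp [bundleScan]
      rw [hstep, ih [] _ (by intro x hx; simp at hx)]
      cases cur with
      | nil => simp [pvSplit]
      | cons a as =>
        have hall : (a :: as).reverse.all pvValid = true := by
          rw [List.all_eq_true]; intro x hx; exact hcur x (List.mem_reverse.mp hx)
        have hlen : 0 < (a :: as).length := by simp
        have hsp : pvSplit (a :: as) ('.' :: rest) = (a :: as).reverse :: pvSplit [] rest := by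
          simp [pvSplit]
        rw [hsp, List.filter_cons_of_pos (by simp)]
        simp only [List.length_cons, List.all_cons, hall, Bool.true_and]
        simp only [if_pos (Nat.succ_pos as.length)]
        have harith : (2 ≤ count + 1 + ((pvSplit [] rest).filter (fun p => !p.isEmpty)).length)
            ↔ (2 ≤ count + (((pvSplit [] rest).filter (fun p => !p.isEmpty)).length + 1)) := by omega
        rw [decide_eq_decide.mpr harith]
    · by_cases hv : pvValid c = true
      · have hstep : bundleScan (c :: rest) cur.length count
            = bundleScan rest (c :: cur).length count := by
          have hcb : (c == '.') = false := by simp [hc]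
          have hvb : (PySem.Chars.isalnum c || c == '-' || c == '_') = true := by
            simpa [pvValid, Bool.or_assoc] using hv
          simp [bundleScan, hcb, hvb]
        rw [hstep, ih (c :: cur) count (by
          intro x hx
          rcases List.mem_cons.mp hx with h | h
          · subst h; exact hv
          · exact hcur x h)]
        simp [pvSplit, hc]
      · have hstep : bundleScan (c :: rest) cur.length count = false := by
          have hcb : (c == '.') = false := by simp [hc]
          have hvb : (PySem.Chars.isalnum c || c == '-' || c == '_') = false := by
            simpa [pvValid, Bool.or_assoc] using (Bool.eq_false_iff.mpr (fun h => hv h) : pvValid c = false)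
          simp [bundleScan, hcb, hvb]
        rw [hstep]
        obtain ⟨p, hp, hsub⟩ := pvSplit_exists_superset rest (c :: cur)
        have hcp : c ∈ p := hsub c (by simp)
        have hpe : (pvSplit cur (c :: rest)) = pvSplit (c :: cur) rest := by simp [pvSplit, hc]
        rw [hpe]
        have hpf : p ∈ (pvSplit (c :: cur) rest).filter (fun p => !p.isEmpty) := by
          refine List.mem_filter.mpr ⟨hp, ?_⟩
          cases p with
          | nil => simp at hcp
          | cons _ _ => simp
        have hbad : ((pvSplit (c :: cur) rest).filter (fun p => !p.isEmpty)).all (fun p => p.all pvValid) = false := by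
          rw [Bool.eq_false_iff]
          intro hall
          have := (List.all_eq_true.mp hall) p hpf
          have := (List.all_eq_true.mp this) c hcp
          exact hv this
        simp [hbad]

theorem ports_agree (identifier : String) :
    looks_like_bundle_identifier_py identifier = looks_like_bundle_identifier_py_alt identifier := by
  unfold looks_like_bundle_identifier_py looks_like_bundle_identifier_py_alt
  have hsplit : PySem.Chars.split? identifier.toList ['.'] = some (pvSplit [] identifier.toList) := by
    simp only [PySem.Chars.split?]
    rw [if_neg (by simp)]
    rw [PySem.Chars.splitOn, pvGo_eq (identifier.toList.length + 1) identifier.toList [] [] (Nat.le_succ _)]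
    simp
  rw [hsplit]
  dsimp only
  have hb := bundleScan_eq identifier.toList [] 0 (by intro x hx; simp at hx)
  simp only [List.length_nil] at hb
  rw [hb]
  set parts := (pvSplit [] identifier.toList).filter (fun p => !p.isEmpty) with hp
  by_cases hlen : parts.length < 2
  · rw [if_pos hlen]
    have hd : decide (2 ≤ 0 + parts.length) = false := by
      simp only [decide_eq_false_iff_not]; omega
    rw [hd, Bool.false_and]
  · rw [if_neg hlen]
    have hd : decide (2 ≤ 0 + parts.length) = true := by
      simp only [decide_eq_true_eq]; omega
    rw [hd, Bool.true_and]
    have hfun : pvValid = fun ch => PySem.Chars.isalnum ch || ch == '-' || ch == '_' := by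
      funext c; rfl
    rw [hfun]

-- ===== VERDICT (by name: the statement is the Claim_ definition above) =====
theorem looks_like_bundle_identifier_py_spec : Claim_equal_looks_like_bundle_identifier_py := by
  intro identifier _
  unfold Spec_looks_like_bundle_identifier_py
  exact ports_agree identifier
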